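-- pv_equiv track=rewrite | github.com/FilippoITS/Esercizi | Lezione2/Lezione5/lezione5Es.py | count_isolated
-- ===== SOURCE A (Python) =====
-- def count_isolated(lista:list) -> int:
--     # cancella ... e definisci parametri e tipo di dato, successivamente cancella pass e scrivi il tuo codice
--
--     counter:int = 0
--
--     if len(lista) == 0:
--         return counter
--     else:
--
--         if lista[0] != lista[1]:
--             counter += 1
--
--         if lista[-1] != lista[-2]:
--             counter += 1
--
--         for i in range(1,len(lista)-1):
--             if lista[i] != lista[i-1] and lista[i] != lista[i+1]:
--                 counter += 1
--
--         return counter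
-- ===== SOURCE B (Python) =====
-- def count_isolated(lista: list) -> int:
--     # Run-length encode the list (reversed: runs[0] is the current run),
--     # then count the runs of length exactly 1.
--     runs = []
--     for x in lista:
--         if runs and runs[0][0] == x:
--             runs[0] = (x, runs[0][1] + 1)
--         else:
--             runs.insert(0, (x, 1))
--     return sum(1 for _, k in runs if k == 1)
-- ===== Notes on version B (the rewrite author's own statement) =====
-- stated objective: alternative
-- what changed: B run-length-encodes the list into (value, run length) pairs and returns the number of runs of length exactly 1, instead of A's per-index comparison of each element with its neighbours; an element is isolated iff its run has length 1 (with the length-2 list giving two singleton runs, matching A's double count).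
import Mathlib
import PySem

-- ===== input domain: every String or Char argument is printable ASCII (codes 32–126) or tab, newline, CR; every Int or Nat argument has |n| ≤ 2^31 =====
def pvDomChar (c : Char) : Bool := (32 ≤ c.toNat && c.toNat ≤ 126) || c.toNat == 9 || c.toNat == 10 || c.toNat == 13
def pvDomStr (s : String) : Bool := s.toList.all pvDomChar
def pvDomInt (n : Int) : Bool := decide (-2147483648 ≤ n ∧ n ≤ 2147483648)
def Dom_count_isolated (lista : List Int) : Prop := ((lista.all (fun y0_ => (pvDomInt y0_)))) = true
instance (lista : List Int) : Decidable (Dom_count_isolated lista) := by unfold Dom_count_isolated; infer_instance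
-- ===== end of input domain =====

-- B run-length-encodes the list and counts the runs of length 1 instead of comparing each element with its neighbours (alternative algorithm, same cost).

-- ===== PORT A =====
def count_isolated (lista : List Int) : Int :=
  let counter : Int := 0
  if lista.length == 0 then counter
  else
    let counter := if PySem.List.pyGetD lista 0 0 ≠ PySem.List.pyGetD lista 1 0 then counter + 1 else counter
    let counter := if PySem.List.pyGetD lista (-1) 0 ≠ PySem.List.pyGetD lista (-2) 0 then counter + 1 else counter
    (PySem.List.pyRange 1 ((lista.length : Int) - 1) 1).foldl
      (fun c i =>
        if PySem.List.pyGetD lista i 0 ≠ PySem.List.pyGetD lista (i-1) 0 ∧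
           PySem.List.pyGetD lista i 0 ≠ PySem.List.pyGetD lista (i+1) 0
        then c + 1 else c) counter

-- ===== PORT B =====
-- runs is kept reversed: its head is the current run, as in Source B (runs[0])
def rleStep (runs : List (Int × Int)) (x : Int) : List (Int × Int) :=
  match runs with
  | (v, k) :: rest => if v = x then (x, k + 1) :: rest else (x, 1) :: (v, k) :: rest
  | [] => [(x, 1)]

def count_isolated_alt (lista : List Int) : Int :=
  let runs : List (Int × Int) := lista.foldl rleStep []
  (runs.map (fun vk => if vk.2 = 1 then (1 : Int) else 0)).sum

-- ===== PRECONDITION & SPEC =====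
-- Pre_ excludes only one-element lists, on which A raises IndexError (it reads lista[1]).
def Pre_count_isolated (lista : List Int) : Prop := lista = [] ∨ 2 ≤ lista.length
instance (lista : List Int) : Decidable (Pre_count_isolated lista) := by unfold Pre_count_isolated; infer_instance
def pvWitness_count_isolated : List Int := [1, 2, 1]
def Spec_count_isolated (lista : List Int) (out : Int) : Prop := out = count_isolated_alt lista
instance (lista : List Int) (out : Int) : Decidable (Spec_count_isolated lista out) := by unfold Spec_count_isolated; infer_instance

-- ===== CLAIM (what is proved, stated in full; the proofs are below) =====
def Claim_equal_count_isolated : Prop := ∀ (lista : List Int), Dom_count_isolated lista → Pre_count_isolated lista → Spec_count_isolated lista (count_isolated lista)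

-- ===== LEMMAS AND PROOFS =====

-- 'isoAux prev xs' counts the elements of xs that differ from their left neighbour
-- (prev for the first one) and from their right neighbour (none for the last one).
def isoAux : Int → List Int → Int
  | _, [] => 0
  | prev, [x] => if x ≠ prev then 1 else 0
  | prev, x :: y :: t => (if x ≠ prev ∧ x ≠ y then 1 else 0) + isoAux x (y :: t)

-- 'phi v k xs': singleton-run count contributed by a current run of value v, length k, followed by xs.
def phi : Int → Int → List Int → Int
  | _, k, [] => if k = 1 then 1 else 0
  | v, k, x :: t => if v = x then phi v (k + 1) t else (if k = 1 then 1 else 0) + phi x 1 t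

theorem fold_rle_singles (xs : List Int) : ∀ (v k : Int) (rest : List (Int × Int)),
    ((xs.foldl rleStep ((v, k) :: rest)).map (fun vk => if vk.2 = 1 then (1 : Int) else 0)).sum
      = phi v k xs + ((rest.map (fun vk => if vk.2 = 1 then (1 : Int) else 0)).sum) := by
  induction xs with
  | nil => intro v k rest; simp [phi]
  | cons x t ih =>
    intro v k rest
    by_cases h : v = x
    · subst h
      rw [List.foldl_cons, show rleStep ((v, k) :: rest) v = (v, k + 1) :: rest from by simp [rleStep],
          show phi v k (v :: t) = phi v (k + 1) t from by simp [phi], ih]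
    · simp only [List.foldl_cons, rleStep, if_neg h, phi, ih, List.map_cons, List.sum_cons]
      ring

theorem alt_eq_phi (a : Int) (xs : List Int) : count_isolated_alt (a :: xs) = phi a 1 xs := by
  simp only [count_isolated_alt, List.foldl_cons, rleStep]
  rw [fold_rle_singles]
  simp

theorem isoAux_cons_self (v : Int) (t : List Int) : isoAux v (v :: t) = isoAux v t := by
  cases t with
  | nil => simp [isoAux]
  | cons y t' => simp [isoAux]

theorem phi_isoAux (xs : List Int) :
    (∀ v k : Int, 2 ≤ k → phi v k xs = isoAux v xs) ∧
    (∀ v prev : Int, prev ≠ v → phi v 1 xs = isoAux prev (v :: xs)) := by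
  induction xs with
  | nil =>
    constructor
    · intro v k hk
      simp only [phi, isoAux]
      rw [if_neg (by omega)]
    · intro v prev h
      simp [phi, isoAux, Ne.symm h]
  | cons x t ih =>
    constructor
    · intro v k hk
      by_cases h : v = x
      · subst h
        rw [show phi v k (v :: t) = phi v (k + 1) t from by simp [phi],
            ih.1 v (k + 1) (by omega), isoAux_cons_self]
      · rw [show phi v k (x :: t) = (if k = 1 then 1 else 0) + phi x 1 t from by simp [phi, h],
            if_neg (by omega), ih.2 x v h]
        ring
    · intro v prev hpv
      by_cases h : v = x
      · subst h
        rw [show phi v 1 (v :: t) = phi v 2 t from by simp [phi],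
            ih.1 v 2 le_rfl,
            show isoAux prev (v :: v :: t) = (if v ≠ prev ∧ v ≠ v then 1 else 0) + isoAux v (v :: t) from rfl,
            isoAux_cons_self, if_neg (by simp)]
        ring
      · rw [show phi v 1 (x :: t) = (if (1:Int) = 1 then 1 else 0) + phi x 1 t from by simp [phi, h],
            if_pos rfl, ih.2 x v h,
            show isoAux prev (v :: x :: t) = (if v ≠ prev ∧ v ≠ x then 1 else 0) + isoAux v (x :: t) from rfl,
            if_pos ⟨Ne.symm hpv, h⟩]

theorem bridge (a b : Int) (t : List Int) :
    (if a ≠ b then (1 : Int) else 0) + isoAux a (b :: t) = phi a 1 (b :: t) := by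
  by_cases h : a = b
  · subst h
    rw [show phi a 1 (a :: t) = phi a 2 t from by simp [phi],
        (phi_isoAux t).1 a 2 le_rfl, isoAux_cons_self, if_neg (by simp)]
    ring
  · rw [show phi a 1 (b :: t) = (if (1:Int) = 1 then 1 else 0) + phi b 1 t from by simp [phi, h],
        if_pos rfl, (phi_isoAux t).2 b a h, if_pos h]

-- A-side index-sum characterisation
def gA (l : List Int) (i : Int) : Int :=
  if PySem.List.pyGetD l i 0 ≠ PySem.List.pyGetD l (i-1) 0 ∧
     PySem.List.pyGetD l i 0 ≠ PySem.List.pyGetD l (i+1) 0 then 1 else 0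

def SA (l : List Int) : Int :=
  (if PySem.List.pyGetD l 0 0 ≠ PySem.List.pyGetD l 1 0 then 1 else 0)
  + (if PySem.List.pyGetD l (-1) 0 ≠ PySem.List.pyGetD l (-2) 0 then 1 else 0)
  + ((PySem.List.pyRange 1 ((l.length : Int) - 1) 1).map (gA l)).sum

theorem count_eq_SA (l : List Int) (h2 : 2 ≤ l.length) : count_isolated l = SA l := by
  have hne : (l.length == 0) = false := by simp only [beq_eq_false_iff_ne]; omega
  simp only [count_isolated, hne, Bool.false_eq_true, if_false]
  rw [PySem.List.foldl_congr_mem (PySem.List.pyRange 1 ((l.length : Int) - 1) 1)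
        (fun c i => if PySem.List.pyGetD l i 0 ≠ PySem.List.pyGetD l (i-1) 0 ∧
           PySem.List.pyGetD l i 0 ≠ PySem.List.pyGetD l (i+1) 0 then c + 1 else c)
        (fun c i => c + gA l i) _ (by
          intro acc i _
          simp only [gA]
          split_ifs <;> ring)]
  rw [PySem.List.foldl_add]
  simp only [SA]
  split_ifs <;> ring

theorem pyGetD_cons_shift (a : Int) (l : List Int) (i : Int) (h1 : 1 ≤ i) (h2 : i ≤ l.length) :
    PySem.List.pyGetD (a :: l) i 0 = PySem.List.pyGetD l (i - 1) 0 := by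
  rw [PySem.List.pyGetD_eq_getElem (a :: l) 0 (by omega) (by simp; omega),
      PySem.List.pyGetD_eq_getElem l 0 (by omega) (by omega)]
  have hnat : i.toNat = (i - 1).toNat + 1 := by omega
  simp only [hnat, List.getElem_cons_succ]

theorem negEnd1 (a : Int) (l : List Int) (h2 : 1 ≤ l.length) :
    PySem.List.pyGetD (a :: l) (-1) 0 = PySem.List.pyGetD l (-1) 0 := by
  rw [PySem.List.pyGetD_neg_ofNat (a :: l) 1 0 (by omega) (by simp only [List.length_cons]; omega),
      PySem.List.pyGetD_neg_ofNat l 1 0 (by omega) h2]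
  have h3 : (a :: l).length - 1 = (l.length - 1) + 1 := by simp only [List.length_cons]; omega
  simp only [h3, List.getElem_cons_succ]

theorem negEnd2 (a : Int) (l : List Int) (h2 : 2 ≤ l.length) :
    PySem.List.pyGetD (a :: l) (-2) 0 = PySem.List.pyGetD l (-2) 0 := by
  rw [PySem.List.pyGetD_neg_ofNat (a :: l) 2 0 (by omega) (by simp only [List.length_cons]; omega),
      PySem.List.pyGetD_neg_ofNat l 2 0 (by omega) h2]
  have h3 : (a :: l).length - 2 = (l.length - 2) + 1 := by simp only [List.length_cons]; omega
  simp only [h3, List.getElem_cons_succ]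

theorem sum_shift (a : Int) (l : List Int) (h2 : 2 ≤ l.length) :
    ((PySem.List.pyRange 2 (l.length : Int) 1).map (gA (a :: l))).sum
      = ((PySem.List.pyRange 1 ((l.length : Int) - 1) 1).map (gA l)).sum := by
  rw [PySem.List.pyRange_one 2 (l.length : Int), PySem.List.pyRange_one 1 ((l.length : Int) - 1),
      List.map_map, List.map_map]
  have hlen : ((l.length : Int) - 1 - 1).toNat = ((l.length : Int) - 2).toNat := by omega
  rw [hlen]
  refine congrArg List.sum (List.map_congr_left ?_)
  intro k hk
  simp only [List.mem_range] at hk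
  simp only [Function.comp_apply]
  have hA1 : PySem.List.pyGetD (a :: l) (2 + (k : Int)) 0 = PySem.List.pyGetD l (1 + (k : Int)) 0 := by
    rw [pyGetD_cons_shift a l _ (by omega) (by omega),
        show (2 + (k : Int)) - 1 = 1 + (k : Int) from by ring]
  have hA2 : PySem.List.pyGetD (a :: l) (1 + (k : Int)) 0 = PySem.List.pyGetD l (k : Int) 0 := by
    rw [pyGetD_cons_shift a l _ (by omega) (by omega),
        show (1 + (k : Int)) - 1 = (k : Int) from by ring]
  have hA3 : PySem.List.pyGetD (a :: l) (3 + (k : Int)) 0 = PySem.List.pyGetD l (2 + (k : Int)) 0 := by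
    rw [pyGetD_cons_shift a l _ (by omega) (by omega),
        show (3 + (k : Int)) - 1 = 2 + (k : Int) from by ring]
  simp only [gA]
  rw [show (2 + (k : Int)) - 1 = 1 + (k : Int) from by ring,
      show (2 + (k : Int)) + 1 = 3 + (k : Int) from by ring,
      show (1 + (k : Int)) - 1 = (k : Int) from by ring,
      show (1 + (k : Int)) + 1 = 2 + (k : Int) from by ring,
      hA1, hA2, hA3]

theorem SA_eq_isoAux : ∀ (t : List Int) (a b : Int),
    SA (a :: b :: t) = (if a ≠ b then 1 else 0) + isoAux a (b :: t) := by
  intro t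
  induction t with
  | nil =>
    intro a b
    have h0 : PySem.List.pyGetD [a, b] 0 0 = a := rfl
    have h1 : PySem.List.pyGetD [a, b] 1 0 = b := rfl
    have hn1 : PySem.List.pyGetD [a, b] (-1) 0 = b := rfl
    have hn2 : PySem.List.pyGetD [a, b] (-2) 0 = a := rfl
    have hr : PySem.List.pyRange 1 (([a, b].length : Int) - 1) 1 = [] := by
      rw [show (([a, b].length : Int) - 1) = 1 from by simp]
      exact PySem.List.pyRange_one_eq_nil le_rfl
    simp only [SA, h0, h1, hn1, hn2, hr, List.map_nil, List.sum_nil, add_zero, isoAux]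
  | cons c t' ih =>
    intro a b
    have hE1b : PySem.List.pyGetD (a :: b :: c :: t') 1 0 = b := by
      rw [PySem.List.pyGetD_eq_getElem (a :: b :: c :: t') 0 (by omega) (by simp only [List.length_cons]; omega)]
      rfl
    have hE1c : PySem.List.pyGetD (a :: b :: c :: t') 2 0 = c := by
      rw [PySem.List.pyGetD_eq_getElem (a :: b :: c :: t') 0 (by omega) (by simp only [List.length_cons]; omega)]
      rfl
    have hgA1 : gA (a :: b :: c :: t') 1 = if b ≠ a ∧ b ≠ c then 1 else 0 := by
      simp only [gA]
      rw [show (1 : Int) - 1 = 0 from by norm_num, show (1 : Int) + 1 = 2 from by norm_num,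
          hE1b, hE1c, PySem.List.pyGetD_zero_cons]
    have hr : ((a :: b :: c :: t').length : Int) - 1 = ((b :: c :: t').length : Int) := by
      simp only [List.length_cons]
      push_cast
      ring
    have hih := ih b c
    have hih1 : PySem.List.pyGetD (b :: c :: t') 0 0 = b := PySem.List.pyGetD_zero_cons b (c :: t') 0
    have hih2 : PySem.List.pyGetD (b :: c :: t') 1 0 = c := by
      rw [PySem.List.pyGetD_eq_getElem (b :: c :: t') 0 (by omega) (by simp only [List.length_cons]; omega)]
      rfl
    simp only [SA, hih1, hih2] at hih
    simp only [SA]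
    rw [hr, PySem.List.pyRange_one_cons (by simp only [List.length_cons]; push_cast; omega),
        show (1 : Int) + 1 = 2 from by norm_num, List.map_cons, List.sum_cons,
        sum_shift a (b :: c :: t') (by simp only [List.length_cons]; omega),
        hgA1, hE1b, PySem.List.pyGetD_zero_cons,
        negEnd1 a (b :: c :: t') (by simp only [List.length_cons]; omega),
        negEnd2 a (b :: c :: t') (by simp only [List.length_cons]; omega),
        show isoAux a (b :: c :: t') = (if b ≠ a ∧ b ≠ c then 1 else 0) + isoAux b (c :: t') from rfl]
    linarith [hih]

-- ===== VERDICT (by name: the statement is the Claim_ definition above) =====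
theorem count_isolated_spec : Claim_equal_count_isolated := by
  intro l _ hpre
  unfold Spec_count_isolated
  rcases hpre with h | h2
  · subst h; rfl
  · match l, h2 with
    | a :: b :: t, _ =>
      rw [count_eq_SA _ (by simp only [List.length_cons]; omega), SA_eq_isoAux, bridge, alt_eq_phi]
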